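-- pv_equiv track=rewrite | github.com/QuBiit0/QuBot | backend/app/core/context_compactor.py | _heuristic_summary
-- ===== SOURCE A (Python) =====
-- def _heuristic_summary(
--
--     messages: list[dict],
--     existing_summary: str | None,
-- ) -> str:
--     """Fallback summary without LLM."""
--     user_msgs = [m for m in messages if m.get("role") == "user"]
--     asst_msgs = [m for m in messages if m.get("role") == "assistant"]
--
--     parts: list[str] = []
--     if existing_summary:
--         parts.append(existing_summary)
--
--     parts.append(
--         f"[Compacted: {len(messages)} messages — "
--         f"{len(user_msgs)} user / {len(asst_msgs)} assistant]"
--     )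
--
--     if user_msgs:
--         first = user_msgs[0].get("content", "")
--         if isinstance(first, str):
--             parts.append(f"Original request: {first[:300]}")
--
--     if asst_msgs:
--         last = asst_msgs[-1].get("content", "")
--         if isinstance(last, str) and last:
--             parts.append(f"Last result: {last[:400]}")
--
--     return "\n".join(parts)
-- ===== SOURCE B (Python) =====
-- def _heuristic_summary(
--     messages: list[dict],
--     existing_summary: str | None,
-- ) -> str:
--     """Fallback summary without LLM — single pass, no intermediate filtered lists."""
--     user_count = 0
--     asst_count = 0
--     first_user_content = None   # content of the first user message (sentinel: none seen)
--     last_asst_content = None    # content of the most recent assistant message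
--     for m in messages:
--         role = m.get("role")
--         if role == "user":
--             user_count += 1
--             if first_user_content is None:
--                 first_user_content = m.get("content", "")
--         elif role == "assistant":
--             asst_count += 1
--             last_asst_content = m.get("content", "")
--
--     parts: list[str] = []
--     if existing_summary:
--         parts.append(existing_summary)
--     parts.append(
--         f"[Compacted: {len(messages)} messages — "
--         f"{user_count} user / {asst_count} assistant]"
--     )
--     if first_user_content is not None and isinstance(first_user_content, str):
--         parts.append(f"Original request: {first_user_content[:300]}")
--     if last_asst_content is not None and isinstance(last_asst_content, str) and last_asst_content:
--         parts.append(f"Last result: {last_asst_content[:400]}")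
--     return "\n".join(parts)
-- ===== Notes on version B (the rewrite author's own statement) =====
-- stated objective: simpler
-- what changed: One fold over messages keeps only four scalars (two counts, first user content, last assistant content) instead of building two filtered message lists and indexing into them.
import Mathlib
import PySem

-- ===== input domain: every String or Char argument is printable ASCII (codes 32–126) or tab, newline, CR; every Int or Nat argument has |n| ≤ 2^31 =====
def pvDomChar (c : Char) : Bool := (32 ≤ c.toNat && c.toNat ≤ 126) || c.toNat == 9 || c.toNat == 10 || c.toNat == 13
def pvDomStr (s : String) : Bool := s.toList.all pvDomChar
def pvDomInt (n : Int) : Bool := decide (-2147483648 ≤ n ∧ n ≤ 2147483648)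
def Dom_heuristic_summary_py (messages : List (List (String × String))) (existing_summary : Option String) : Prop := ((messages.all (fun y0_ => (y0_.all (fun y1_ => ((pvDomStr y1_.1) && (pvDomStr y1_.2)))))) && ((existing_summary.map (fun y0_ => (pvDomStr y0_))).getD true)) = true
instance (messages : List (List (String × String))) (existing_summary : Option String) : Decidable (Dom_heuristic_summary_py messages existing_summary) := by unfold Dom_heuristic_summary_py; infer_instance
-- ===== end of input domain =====

-- B replaces A's two filtered lists by ONE fold keeping four scalars (counts, first user
-- content, last assistant content); objective: simpler. Return value only, no mutation.
-- Under the type convention dict values are String, so Python's `isinstance(·, str)` is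
-- always true and the ports omit it.

-- ===== PORT A =====
-- m.get(k) = first match in the association list; m.get(k, "") likewise with default.
def heuristic_summary_py (messages : List (List (String × String))) (existing_summary : Option String) : String :=
  let user_msgs := messages.filter (fun m => m.lookup "role" == some "user")
  let asst_msgs := messages.filter (fun m => m.lookup "role" == some "assistant")
  -- `if existing_summary:` — truthy = some non-empty string
  let parts : List String :=
    match existing_summary with
    | some s => if s ≠ "" then [s] else []
    | none => []
  let parts := parts ++
    ["[Compacted: " ++ PySem.Int.toStr messages.length ++ " messages — "
      ++ PySem.Int.toStr user_msgs.length ++ " user / "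
      ++ PySem.Int.toStr asst_msgs.length ++ " assistant]"]
  let parts := parts ++
    (match user_msgs with
     | [] => []
     | m :: _ =>
       let first := (m.lookup "content").getD ""
       ["Original request: " ++ PySem.Str.slice first none (some 300)])
  let parts := parts ++
    (match asst_msgs.getLast? with
     | none => []
     | some m =>
       let last := (m.lookup "content").getD ""
       if last ≠ "" then ["Last result: " ++ PySem.Str.slice last none (some 400)] else [])
  PySem.Str.join "\n" parts

-- ===== PORT B =====
-- loop body of B: state = (user_count, asst_count, first_user_content, last_asst_content)
def hsStep (st : Nat × Nat × Option String × Option String) (m : List (String × String)) :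
    Nat × Nat × Option String × Option String :=
  let role := m.lookup "role"
  if role == some "user" then
    (st.1 + 1, st.2.1, st.2.2.1.or (some ((m.lookup "content").getD "")), st.2.2.2)
  else if role == some "assistant" then
    (st.1, st.2.1 + 1, st.2.2.1, some ((m.lookup "content").getD ""))
  else st

def heuristic_summary_py_alt (messages : List (List (String × String))) (existing_summary : Option String) : String :=
  let st := messages.foldl hsStep (0, 0, none, none)
  let parts : List String :=
    match existing_summary with
    | some s => if s ≠ "" then [s] else []
    | none => []
  let parts := parts ++
    ["[Compacted: " ++ PySem.Int.toStr messages.length ++ " messages — "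
      ++ PySem.Int.toStr st.1 ++ " user / "
      ++ PySem.Int.toStr st.2.1 ++ " assistant]"]
  let parts := parts ++
    (match st.2.2.1 with
     | some c => ["Original request: " ++ PySem.Str.slice c none (some 300)]
     | none => [])
  let parts := parts ++
    (match st.2.2.2 with
     | some c => if c ≠ "" then ["Last result: " ++ PySem.Str.slice c none (some 400)] else []
     | none => [])
  PySem.Str.join "\n" parts

-- ===== PRECONDITION & SPEC =====
def Spec_heuristic_summary_py (messages : List (List (String × String))) (existing_summary : Option String) (out : String) : Prop := out = heuristic_summary_py_alt messages existing_summary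
instance (messages : List (List (String × String))) (existing_summary : Option String) (out : String) : Decidable (Spec_heuristic_summary_py messages existing_summary out) := by unfold Spec_heuristic_summary_py; infer_instance

-- ===== CLAIM (what is proved, stated in full; the proofs are below) =====
def Claim_equal_heuristic_summary_py : Prop := ∀ (messages : List (List (String × String))) (existing_summary : Option String), Dom_heuristic_summary_py messages existing_summary → Spec_heuristic_summary_py messages existing_summary (heuristic_summary_py messages existing_summary)

-- ===== LEMMAS AND PROOFS =====
def hsIsUser (m : List (String × String)) : Bool := m.lookup "role" == some "user"
def hsIsAsst (m : List (String × String)) : Bool := m.lookup "role" == some "assistant"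
def hsContent (m : List (String × String)) : String := (m.lookup "content").getD ""

lemma hsStep_fold_spec (ms : List (List (String × String))) (u a : Nat) (fu la : Option String) :
    ms.foldl hsStep (u, a, fu, la) =
      (u + (ms.filter hsIsUser).length,
       a + (ms.filter hsIsAsst).length,
       fu.or (((ms.filter hsIsUser).head?).map hsContent),
       (((ms.filter hsIsAsst).getLast?).map hsContent).or la) := by
  induction ms generalizing u a fu la with
  | nil => simp
  | cons m rest ih =>
    simp only [List.foldl_cons, List.filter_cons]
    by_cases hu : hsIsUser m
    · have ha : hsIsAsst m = false := by
        simp only [hsIsUser, beq_iff_eq] at hu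
        simp [hsIsAsst, hu]
      have hstep : hsStep (u, a, fu, la) m
          = (u + 1, a, fu.or (some (hsContent m)), la) := by
        simp only [hsIsUser] at hu
        simp [hsStep, hu, hsContent]
      rw [hu, ha, hstep, ih]
      simp only [if_true, List.length_cons, List.head?_cons]
      refine congrArg₂ _ (by omega) (congrArg₂ _ rfl (congrArg₂ _ ?_ rfl))
      cases fu <;> simp
    · simp only [Bool.not_eq_true] at hu
      by_cases ha : hsIsAsst m
      · have hstep : hsStep (u, a, fu, la) m
            = (u, a + 1, fu, some (hsContent m)) := by
          simp only [hsIsUser] at hu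
          simp only [hsIsAsst] at ha
          simp [hsStep, hu, ha, hsContent]
        rw [hu, ha, hstep, ih]
        simp only [if_true, List.length_cons]
        refine congrArg₂ _ rfl (congrArg₂ _ (by omega) (congrArg₂ _ rfl ?_))
        rcases h : (rest.filter hsIsAsst).getLast? with _ | m'
        · simp [List.getLast?_cons, List.getLast?_eq_none_iff.mp h]
        · have hne : rest.filter hsIsAsst ≠ [] := by
            intro hnil; rw [hnil] at h; simp at h
          rcases List.exists_cons_of_ne_nil hne with ⟨x, xs, hx⟩
          simp [hx, List.getLast?_cons]
          rw [hx] at h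
          simp [List.getLast?_cons] at h
          simp [h]
      · simp only [Bool.not_eq_true] at ha
        have hstep : hsStep (u, a, fu, la) m = (u, a, fu, la) := by
          simp only [hsIsUser] at hu
          simp only [hsIsAsst] at ha
          simp [hsStep, hu, ha]
        rw [hu, ha, hstep, ih]
        simp

-- ===== VERDICT (by name: the statement is the Claim_ definition above) =====
theorem heuristic_summary_py_spec : Claim_equal_heuristic_summary_py := by
  intro messages existing_summary _
  unfold Spec_heuristic_summary_py heuristic_summary_py heuristic_summary_py_alt
  rw [hsStep_fold_spec]
  simp only [Nat.zero_add, Option.or_none, Option.none_or]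
  congr 1
  have hU : messages.filter (fun m => m.lookup "role" == some "user") = messages.filter hsIsUser := rfl
  have hA : messages.filter (fun m => m.lookup "role" == some "assistant") = messages.filter hsIsAsst := rfl
  rw [hU, hA]
  congr 2
  · rcases h : messages.filter hsIsUser with _ | ⟨m, rest⟩ <;> simp [hsContent]
  · rcases h : (messages.filter hsIsAsst).getLast? with _ | m <;> simp [hsContent]
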